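-- pv_equiv track=rewrite | github.com/GreenWaves-Technologies/gap_sdk | tools/nntool/nntool/graph/types/tensor_arithmetic.py | transpose_mask
-- ===== SOURCE A (Python) =====
-- def transpose_mask(mask, trans):
--     out_idx = 0
--     res = []
--     for axis in trans:
--         if mask[axis] is None:
--             res.append(None)
--         else:
--             res.append(out_idx)
--             out_idx += 1
--     return tuple(res)
-- ===== SOURCE B (Python) =====
-- def transpose_mask(mask, trans):
--     keep = [mask[axis] is not None for axis in trans]
--     prefix = []
--     total = 0
--     for k in keep:
--         total += k
--         prefix.append(total)
--     return tuple(prefix[i] - 1 if keep[i] else None for i in range(len(keep)))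
-- ===== Notes on version B (the rewrite author's own statement) =====
-- stated objective: alternative
-- what changed: A's single pass with a running out_idx counter is replaced by a three-stage pipeline: a boolean keep-list over trans, a prefix-sum table counting kept axes, and an index-mapping pass that reads prefix[i]-1; same O(n) cost, different decomposition.
-- outside the precondition, e.g. on transpose_mask([None, 3], [5]): A raises IndexError, B raises IndexError
import Mathlib
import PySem

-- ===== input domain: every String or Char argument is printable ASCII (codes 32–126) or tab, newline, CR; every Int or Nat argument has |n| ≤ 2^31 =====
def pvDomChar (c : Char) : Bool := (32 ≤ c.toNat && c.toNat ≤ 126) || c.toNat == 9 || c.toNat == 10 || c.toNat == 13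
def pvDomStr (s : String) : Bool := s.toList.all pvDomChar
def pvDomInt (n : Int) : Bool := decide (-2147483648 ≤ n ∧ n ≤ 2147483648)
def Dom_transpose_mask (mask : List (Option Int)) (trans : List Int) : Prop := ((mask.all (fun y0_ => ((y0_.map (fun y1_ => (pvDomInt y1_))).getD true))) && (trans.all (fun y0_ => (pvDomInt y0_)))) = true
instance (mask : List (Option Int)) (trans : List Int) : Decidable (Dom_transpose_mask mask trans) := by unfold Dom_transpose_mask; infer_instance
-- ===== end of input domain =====

-- B replaces A's running-counter pass by a keep-list + prefix-sum table + index mapping (alternative decomposition, same cost).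

-- ===== PORT A =====
-- literal port of A: one fold over trans carrying (out_idx, res)
def transpose_mask (mask : List (Option Int)) (trans : List Int) : List (Option Int) :=
  (trans.foldl (fun (st : Int × List (Option Int)) axis =>
      match PySem.List.pyGet? mask axis with
      | some none => (st.1, st.2 ++ [none])
      | some (some _) => (st.1 + 1, st.2 ++ [some st.1])
      | none => st       -- IndexError in Python; excluded by Pre_
    ) (0, [])).2

-- ===== PORT B =====
-- literal port of Source B: keep-list, then prefix-sum loop, then mapping over range(len(keep));
-- keep[i]/prefix[i] are always in range there, so getD is exact.
def transpose_mask_alt (mask : List (Option Int)) (trans : List Int) : List (Option Int) :=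
  let keep : List Bool := trans.map (fun axis =>
    match PySem.List.pyGet? mask axis with
    | some (some _) => true
    | _ => false)        -- 'mask[axis] is not None'; out-of-range raises in Python, excluded by Pre_
  let pfx : List Int := (keep.foldl (fun (st : Int × List Int) k =>
      (st.1 + (if k then 1 else 0), st.2 ++ [st.1 + (if k then 1 else 0)])) (0, [])).2
  (List.range keep.length).map (fun i =>
    if keep.getD i false then some (pfx.getD i 0 - 1) else none)

-- ===== PRECONDITION & SPEC =====
-- Pre_ excludes exactly the inputs where some axis in trans is out of range for mask: there Python A raises IndexError.
def Pre_transpose_mask (mask : List (Option Int)) (trans : List Int) : Prop :=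
  ∀ a ∈ trans, PySem.Raise.InRange mask.length a
instance (mask : List (Option Int)) (trans : List Int) : Decidable (Pre_transpose_mask mask trans) := by
  unfold Pre_transpose_mask PySem.Raise.InRange; infer_instance
def pvWitness_transpose_mask : List (Option Int) × List Int := ([none, some 3, none, some 7], [1, 0, 3, 2, 1])
def Spec_transpose_mask (mask : List (Option Int)) (trans : List Int) (out : List (Option Int)) : Prop := out = transpose_mask_alt mask trans
instance (mask : List (Option Int)) (trans : List Int) (out : List (Option Int)) : Decidable (Spec_transpose_mask mask trans out) := by unfold Spec_transpose_mask; infer_instance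

-- ===== CLAIM (what is proved, stated in full; the proofs are below) =====
def Claim_equal_transpose_mask : Prop := ∀ (mask : List (Option Int)) (trans : List Int), Dom_transpose_mask mask trans → Pre_transpose_mask mask trans → Spec_transpose_mask mask trans (transpose_mask mask trans)

-- ===== LEMMAS AND PROOFS =====

-- shared characterisation: the intended result from a keep-list, with the next output index c
def pvKeep (mask : List (Option Int)) (axis : Int) : Bool :=
  match PySem.List.pyGet? mask axis with
  | some (some _) => true
  | _ => false

def pvG : List Bool → Int → List (Option Int)
  | [], _ => []
  | b :: t, c => (if b then some c else none) :: pvG t (c + (if b then 1 else 0))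

-- running prefix sums from c
def pvPre : List Bool → Int → List Int
  | [], _ => []
  | b :: t, c => (c + (if b then 1 else 0)) :: pvPre t (c + (if b then 1 else 0))

theorem pvA_fold (mask : List (Option Int)) (trans : List Int)
    (h : ∀ a ∈ trans, PySem.Raise.InRange mask.length a) (c : Int) (acc : List (Option Int)) :
    (trans.foldl (fun (st : Int × List (Option Int)) axis =>
      match PySem.List.pyGet? mask axis with
      | some none => (st.1, st.2 ++ [none])
      | some (some _) => (st.1 + 1, st.2 ++ [some st.1])
      | none => st) (c, acc)).2 = acc ++ pvG (trans.map (pvKeep mask)) c := by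
  induction trans generalizing c acc with
  | nil => simp [pvG]
  | cons a t ih =>
    have hin : PySem.Raise.InRange mask.length a := h a (by simp)
    have hsome : PySem.List.pyGet? mask a ≠ none := by
      intro hc; rw [PySem.List.pyGet?_eq_none_iff] at hc; exact hc hin
    have ht : ∀ x ∈ t, PySem.Raise.InRange mask.length x := fun x hx => h x (by simp [hx])
    cases hg : PySem.List.pyGet? mask a with
    | none => exact absurd hg hsome
    | some v =>
      cases v with
      | none => simp [List.foldl, hg, ih ht, pvG, pvKeep]
      | some w => simp [List.foldl, hg, ih ht, pvG, pvKeep]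

theorem pvP_fold (keep : List Bool) (c : Int) (acc : List Int) :
    (keep.foldl (fun (st : Int × List Int) k =>
      (st.1 + (if k then 1 else 0), st.2 ++ [st.1 + (if k then 1 else 0)])) (c, acc)).2
    = acc ++ pvPre keep c := by
  induction keep generalizing c acc with
  | nil => simp [pvPre]
  | cons b t ih => simp [List.foldl, ih, pvPre]

theorem pvMap_eq (keep : List Bool) (c : Int) :
    (List.range keep.length).map (fun i =>
      if keep.getD i false then some ((pvPre keep c).getD i 0 - 1) else none) = pvG keep c := by
  induction keep generalizing c with
  | nil => simp [pvG]
  | cons b t ih =>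
    rw [List.length_cons, List.range_succ_eq_map, List.map_cons, List.map_map]
    have htail : ((List.range t.length).map
        (fun i => if (b :: t).getD (i+1) false
                  then some ((pvPre (b :: t) c).getD (i+1) 0 - 1) else none))
        = pvG t (c + (if b then 1 else 0)) := by
      rw [← ih (c + (if b then 1 else 0))]
      apply List.map_congr_left
      intro i _
      simp [pvPre]
    have hh : (if (b :: t).getD 0 false then some ((pvPre (b :: t) c).getD 0 0 - 1) else none)
        = (if b then some c else none) := by
      cases b <;> simp [pvPre]
    rw [pvG, hh]
    congr 1

-- ===== VERDICT (by name: the statement is the Claim_ definition above) =====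
theorem transpose_mask_spec : Claim_equal_transpose_mask := by
  intro mask trans _ hpre
  unfold Spec_transpose_mask
  simp only [transpose_mask_alt]
  rw [pvP_fold, List.nil_append]
  unfold transpose_mask
  rw [pvA_fold mask trans hpre 0 [], List.nil_append]
  have hk : (List.map (fun axis =>
      match PySem.List.pyGet? mask axis with
      | some (some _) => true
      | _ => false) trans) = trans.map (pvKeep mask) := rfl
  rw [hk, pvMap_eq]
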